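-- pv_equiv track=rewrite | github.com/TerezaZellerova/Coogi-Backend | utils/bulletproof_campaign_creator.py | _group_contacts_by_company
-- ===== SOURCE A (Python) =====
-- from typing import List, Dict, Any, Optional
--
-- def _group_contacts_by_company(contacts: List[Dict], jobs: List[Dict]) -> Dict[str, Dict]:
--     """Group contacts by company with associated jobs"""
--     company_groups = {}
--
--     # Create job lookup by company
--     jobs_by_company = {}
--     for job in jobs:
--         company = job.get("company", "Unknown Company")
--         if company not in jobs_by_company:
--             jobs_by_company[company] = []
--         jobs_by_company[company].append(job)
--
--     # Group contacts by company
--     for contact in contacts: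
--         company = contact.get("company", "Unknown Company")
--
--         if company not in company_groups:
--             company_groups[company] = {
--                 "contacts": [],
--                 "jobs": jobs_by_company.get(company, [])
--             }
--
--         company_groups[company]["contacts"].append(contact)
--
--     return company_groups
-- ===== SOURCE B (Python) =====
-- from typing import List, Dict
--
-- def _group_contacts_by_company(contacts: List[Dict], jobs: List[Dict]) -> Dict[str, Dict]:
--     """Group contacts by company with associated jobs, by per-company filtering."""
--     keys = []
--     for contact in contacts:
--         k = contact.get("company", "Unknown Company")
--         if k not in keys:
--             keys.append(k)
--     return {
--         k: {
--             "contacts": [c for c in contacts if c.get("company", "Unknown Company") == k],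
--             "jobs": [j for j in jobs if j.get("company", "Unknown Company") == k],
--         }
--         for k in keys
--     }
-- ===== Notes on version B (the rewrite author's own statement) =====
-- stated objective: alternative
-- what changed: B builds no dictionary accumulators at all: it collects the distinct contact companies in first-occurrence order and then produces each group by filtering the contacts and jobs lists per company, trading A's two hash-grouping passes for a list of keys plus per-key scans.
import Mathlib
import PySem

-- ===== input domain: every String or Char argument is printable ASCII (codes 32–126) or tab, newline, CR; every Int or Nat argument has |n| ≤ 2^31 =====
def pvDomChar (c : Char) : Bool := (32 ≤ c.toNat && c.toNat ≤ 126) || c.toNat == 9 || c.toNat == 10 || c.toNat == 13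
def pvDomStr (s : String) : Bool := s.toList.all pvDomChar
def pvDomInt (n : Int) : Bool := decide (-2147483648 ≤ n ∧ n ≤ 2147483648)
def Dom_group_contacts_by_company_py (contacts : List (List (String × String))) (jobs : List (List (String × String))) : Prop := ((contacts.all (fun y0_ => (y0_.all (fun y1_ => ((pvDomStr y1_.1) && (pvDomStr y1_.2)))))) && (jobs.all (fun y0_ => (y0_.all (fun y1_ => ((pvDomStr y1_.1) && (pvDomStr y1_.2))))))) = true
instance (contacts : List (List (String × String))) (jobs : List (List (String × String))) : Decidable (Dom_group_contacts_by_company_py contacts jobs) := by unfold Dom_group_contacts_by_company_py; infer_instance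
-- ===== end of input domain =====

-- B uses a different algorithm: no dictionary accumulators at all — it lists the distinct
-- contact companies in first-occurrence order and builds each group by filtering the
-- contacts and jobs lists per company. Proved: A = B on every input.

-- shared helper: x.get("company", "Unknown Company") on the dict x (given as an assoc list)
def pvKey (x : List (String × String)) : String :=
  (PySem.Dict.ofList x).getD "company" "Unknown Company"

-- A-side helper: inner_dict["contacts"].append(x); exact, since A only applies it
-- at a key the inner dict already holds (so modify's default [] is never used)
def pvInnerApp (k : String) (x : List (String × String))
    (inner : List (String × List (List (String × String)))) :
    List (String × List (List (String × String))) :=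
  ((PySem.Dict.mk inner).modify k [] (fun l => l ++ [x])).items

-- ===== PORT A =====
def group_contacts_by_company_py (contacts : List (List (String × String))) (jobs : List (List (String × String))) : List (String × List (String × List (List (String × String)))) :=
  let jbc : PySem.Dict String (List (List (String × String))) :=
    jobs.foldl (fun d job =>
      let c := pvKey job
      let d := if d.contains c then d else d.insert c []
      d.modify c [] (fun l => l ++ [job])) PySem.Dict.empty
  (contacts.foldl (fun g contact =>
      let c := pvKey contact
      let g := if g.contains c then g
               else g.insert c [("contacts", []), ("jobs", jbc.getD c [])]
      g.modify c [] (pvInnerApp "contacts" contact)) PySem.Dict.empty).items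

-- ===== PORT B =====
def group_contacts_by_company_py_alt (contacts : List (List (String × String))) (jobs : List (List (String × String))) : List (String × List (String × List (List (String × String)))) :=
  let keys : List String :=
    contacts.foldl (fun ks x => let k := pvKey x; if k ∈ ks then ks else ks ++ [k]) []
  keys.map (fun k =>
    (k, [("contacts", contacts.filter (fun c => pvKey c == k)),
         ("jobs", jobs.filter (fun j => pvKey j == k))]))

-- ===== PRECONDITION & SPEC =====
def Spec_group_contacts_by_company_py (contacts : List (List (String × String))) (jobs : List (List (String × String))) (out : List (String × List (String × List (List (String × String))))) : Prop := out = group_contacts_by_company_py_alt contacts jobs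
instance (contacts : List (List (String × String))) (jobs : List (List (String × String))) (out : List (String × List (String × List (List (String × String))))) : Decidable (Spec_group_contacts_by_company_py contacts jobs out) := by
  unfold Spec_group_contacts_by_company_py
  letI d3 : DecidableEq (String × List (List (String × String))) := instDecidableEqProd
  letI d4 : DecidableEq (List (String × List (List (String × String)))) := List.hasDecEq
  letI d5 : DecidableEq (String × List (String × List (List (String × String)))) := instDecidableEqProd
  exact List.hasDecEq _ _

-- ===== CLAIM (what is proved, stated in full; the proofs are below) =====
def Claim_equal_group_contacts_by_company_py : Prop := ∀ (contacts : List (List (String × String))) (jobs : List (List (String × String))), Dom_group_contacts_by_company_py contacts jobs → Spec_group_contacts_by_company_py contacts jobs (group_contacts_by_company_py contacts jobs)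

-- ===== LEMMAS AND PROOFS =====

-- canonical shape of A's groups dict: one entry per company in S, contacts cf c, jobs jf c
def mkD (S : List String) (cf jf : String → List (List (String × String))) :
    List (String × List (String × List (List (String × String)))) :=
  S.map (fun c => (c, [("contacts", cf c), ("jobs", jf c)]))

lemma mkD_congr {S : List String} {cf jf cf' jf' : String → List (List (String × String))}
    (h1 : ∀ c ∈ S, cf c = cf' c) (h2 : ∀ c ∈ S, jf c = jf' c) :
    mkD S cf jf = mkD S cf' jf' := by
  unfold mkD; exact List.map_congr_left (fun c hc => by rw [h1 c hc, h2 c hc])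

lemma find_mkD {S : List String} {cf jf : String → List (List (String × String))}
    {c : String} (hc : c ∈ S) :
    List.find? (fun p => p.1 == c) (mkD S cf jf)
      = some (c, [("contacts", cf c), ("jobs", jf c)]) := by
  induction S with
  | nil => cases hc
  | cons a S ih =>
    by_cases hac : a = c
    · subst hac; simp [mkD]
    · simp only [List.mem_cons] at hc
      rcases hc with h | h
      · exact absurd h.symm hac
      · simpa [mkD, hac] using ih h

lemma contains_mkD (S : List String) (cf jf : String → List (List (String × String))) (c : String) :
    (PySem.Dict.mk (mkD S cf jf)).contains c = decide (c ∈ S) := by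
  simp [PySem.Dict.contains, mkD, List.any_map]
  by_cases h : c ∈ S
  · simp only [h, decide_true]
    exact List.any_eq_true.2 ⟨c, h, by simp⟩
  · simp only [h, decide_false]
    exact List.any_eq_false.2 (fun x hx => by simp; exact fun e => h (e ▸ hx))

lemma getD_mkD {S : List String} {cf jf : String → List (List (String × String))}
    {c : String} (hc : c ∈ S) :
    (PySem.Dict.mk (mkD S cf jf)).getD c [] = [("contacts", cf c), ("jobs", jf c)] := by
  simp [PySem.Dict.getD, PySem.Dict.get?, find_mkD hc]

lemma insert_mkD_mem {S : List String} {cf jf : String → List (List (String × String))}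
    {c : String} (hc : c ∈ S) (a b : List (List (String × String))) :
    ((PySem.Dict.mk (mkD S cf jf)).insert c [("contacts", a), ("jobs", b)]).items
      = mkD S (fun c' => if c' = c then a else cf c') (fun c' => if c' = c then b else jf c') := by
  rw [PySem.Dict.insert, contains_mkD S cf jf c]
  simp only [hc, decide_true, if_true]
  show (mkD S cf jf).map _ = _
  unfold mkD
  rw [List.map_map]
  refine List.map_congr_left (fun c' _ => ?_)
  by_cases h : c' = c
  · subst h; simp
  · simp [h]

lemma insert_mkD_not_mem {S : List String} {cf jf : String → List (List (String × String))}
    {c : String} (hc : c ∉ S) (a b : List (List (String × String))) :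
    ((PySem.Dict.mk (mkD S cf jf)).insert c [("contacts", a), ("jobs", b)]).items
      = mkD (S ++ [c]) (fun c' => if c' = c then a else cf c')
            (fun c' => if c' = c then b else jf c') := by
  rw [PySem.Dict.insert, contains_mkD S cf jf c]
  simp only [hc, decide_false, Bool.false_eq_true, if_false]
  show mkD S cf jf ++ [(c, _)] = _
  unfold mkD
  rw [List.map_append]
  congr 1
  · refine List.map_congr_left (fun c' hc' => ?_)
    have h : c' ≠ c := fun e => hc (e ▸ hc')
    simp [h]
  · simp

lemma pvInnerApp_contacts (x : List (String × String)) (a b : List (List (String × String))) :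
    pvInnerApp "contacts" x [("contacts", a), ("jobs", b)]
      = [("contacts", a ++ [x]), ("jobs", b)] := by
  simp [pvInnerApp, PySem.Dict.modify, PySem.Dict.insert, PySem.Dict.getD, PySem.Dict.get?,
    PySem.Dict.contains]

lemma modify_mkD_contacts {S : List String} {cf jf : String → List (List (String × String))}
    {c : String} (hc : c ∈ S) (x : List (String × String)) :
    ((PySem.Dict.mk (mkD S cf jf)).modify c [] (pvInnerApp "contacts" x)).items
      = mkD S (fun c' => if c' = c then cf c' ++ [x] else cf c') jf := by
  rw [PySem.Dict.modify, getD_mkD hc, pvInnerApp_contacts, insert_mkD_mem hc]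
  exact mkD_congr (fun c' _ => by by_cases h : c' = c <;> simp [h])
                  (fun c' _ => by by_cases h : c' = c <;> simp [h])

-- A's contacts loop, parametrised by the jobs a freshly created group starts with
def stepC (J : String → List (List (String × String)))
    (g : PySem.Dict String (List (String × List (List (String × String)))))
    (x : List (String × String)) :
    PySem.Dict String (List (String × List (List (String × String)))) :=
  let c := pvKey x
  let g := if g.contains c then g else g.insert c [("contacts", []), ("jobs", J c)]
  g.modify c [] (pvInnerApp "contacts" x)

-- first-occurrence company keys accumulated over the contacts
def updKeys (S : List String) : List (List (String × String)) → List String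
  | [] => S
  | x :: r => updKeys (if pvKey x ∈ S then S else S ++ [pvKey x]) r

lemma keysFold_eq :
    ∀ (l : List (List (String × String))) (S : List String),
      l.foldl (fun ks x => let k := pvKey x; if k ∈ ks then ks else ks ++ [k]) S
        = updKeys S l := by
  intro l
  induction l with
  | nil => intro S; rfl
  | cons x r ih => intro S; simp only [List.foldl_cons, updKeys]; exact ih _

lemma foldC (J : String → List (List (String × String))) :
    ∀ (rest : List (List (String × String))) (S : List String)
      (cf : String → List (List (String × String))),
      (∀ c, c ∉ S → cf c = []) →
      (rest.foldl (stepC J) (PySem.Dict.mk (mkD S cf J))).items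
        = mkD (updKeys S rest) (fun c => cf c ++ rest.filter (fun x => pvKey x == c)) J := by
  intro rest
  induction rest with
  | nil =>
    intro S cf _
    simp only [List.foldl_nil, updKeys]
    exact mkD_congr (fun c _ => by simp) (fun _ _ => rfl)
  | cons x r ih =>
    intro S cf h0
    simp only [List.foldl_cons, updKeys]
    by_cases hc : pvKey x ∈ S
    · have hstep : stepC J (PySem.Dict.mk (mkD S cf J)) x
          = PySem.Dict.mk (mkD S (fun c' => if c' = pvKey x then cf c' ++ [x] else cf c') J) := by
        apply PySem.Dict.ext
        unfold stepC
        simp only [contains_mkD, hc, decide_true, if_true]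
        exact modify_mkD_contacts hc x
      rw [if_pos hc, hstep,
        ih S _ (fun c hcS => by
          have : ¬ c = pvKey x := fun e => hcS (e ▸ hc)
          simp [this, h0 c hcS])]
      refine mkD_congr (fun c _ => ?_) (fun _ _ => rfl)
      by_cases h : c = pvKey x
      · subst h
        simp [List.append_assoc]
      · have hb : (pvKey x == c) = false := by simpa using fun e => h e.symm
        simp [hb, h]
    · have hins : (PySem.Dict.mk (mkD S cf J)).insert (pvKey x)
            [("contacts", []), ("jobs", J (pvKey x))]
          = PySem.Dict.mk (mkD (S ++ [pvKey x])
              (fun c' => if c' = pvKey x then [] else cf c') J) := by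
        apply PySem.Dict.ext
        rw [insert_mkD_not_mem hc]
        exact mkD_congr (fun _ _ => rfl)
          (fun c' _ => by by_cases h : c' = pvKey x <;> simp [h])
      have hstep : stepC J (PySem.Dict.mk (mkD S cf J)) x
          = PySem.Dict.mk (mkD (S ++ [pvKey x])
              (fun c' => if c' = pvKey x then [x] else cf c') J) := by
        apply PySem.Dict.ext
        unfold stepC
        simp only [contains_mkD, hc, decide_false, Bool.false_eq_true, if_false, hins]
        rw [modify_mkD_contacts (by simp : pvKey x ∈ S ++ [pvKey x]) x]
        exact mkD_congr
          (fun c' _ => by by_cases h : c' = pvKey x <;> simp [h])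
          (fun _ _ => rfl)
      rw [if_neg hc, hstep,
        ih (S ++ [pvKey x]) _ (fun c hcS => by
          have h1 : ¬ c = pvKey x := by simp at hcS; exact fun e => hcS.2 e
          have h2 : c ∉ S := by simp at hcS; exact hcS.1
          simp [h1, h0 c h2])]
      refine mkD_congr (fun c _ => ?_) (fun _ _ => rfl)
      by_cases h : c = pvKey x
      · subst h
        simp [h0 _ hc]
      · have hb : (pvKey x == c) = false := by simpa using fun e => h e.symm
        simp [hb, h]

-- A's jobs_by_company lookup: the guarded insert+append loop is plain modify-append
lemma guard_elim (d : PySem.Dict String (List (List (String × String)))) (c : String)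
    (f : List (List (String × String)) → List (List (String × String))) :
    (if d.contains c then d else d.insert c []).modify c [] f = d.modify c [] f := by
  by_cases h : d.contains c = true
  · rw [if_pos h]
  · simp only [Bool.not_eq_true] at h
    rw [if_neg (by simp [h]), PySem.Dict.modify, PySem.Dict.modify,
      PySem.Dict.getD_insert_self, PySem.Dict.insert_insert_self,
      PySem.Dict.getD_of_not_contains d [] h]

-- A's jobs_by_company, as a lookup function
def jbcFun (jobs : List (List (String × String))) : String → List (List (String × String)) :=
  fun c => (jobs.foldl (fun d job =>
      let c := pvKey job
      let d := if d.contains c then d else d.insert c []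
      d.modify c [] (fun l => l ++ [job]))
    (PySem.Dict.empty : PySem.Dict String (List (List (String × String))))).getD c []

lemma jbcFun_eq (jobs : List (List (String × String))) (c : String) :
    jbcFun jobs c = jobs.filter (fun j => pvKey j == c) := by
  unfold jbcFun
  have hf : (fun (d : PySem.Dict String (List (List (String × String)))) job =>
        let c := pvKey job
        let d := if d.contains c then d else d.insert c []
        d.modify c [] (fun l => l ++ [job]))
      = fun d job => d.modify (pvKey job) [] (fun l => l ++ [job]) := by
    funext d job
    exact guard_elim d (pvKey job) _
  rw [hf]
  have hmap : jobs.foldl (fun d job => d.modify (pvKey job) [] (fun l => l ++ [job]))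
        (PySem.Dict.empty : PySem.Dict String (List (List (String × String))))
      = (jobs.map (fun j => (pvKey j, j))).foldl
          (fun d p => d.modify p.1 [] (fun l => l ++ [p.2])) PySem.Dict.empty := by
    rw [List.foldl_map]
  rw [hmap, PySem.Dict.getD_foldl_modify_append]
  simp [List.filter_map, List.map_map, Function.comp_def]

theorem group_equal (contacts jobs : List (List (String × String))) :
    group_contacts_by_company_py contacts jobs = group_contacts_by_company_py_alt contacts jobs := by
  have hA : group_contacts_by_company_py contacts jobs
      = (contacts.foldl (stepC (jbcFun jobs))
          (PySem.Dict.mk (mkD [] (fun _ => []) (jbcFun jobs)))).items := rfl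
  have hB : group_contacts_by_company_py_alt contacts jobs
      = mkD (updKeys [] contacts)
          (fun k => contacts.filter (fun c => pvKey c == k))
          (fun k => jobs.filter (fun j => pvKey j == k)) := by
    show (contacts.foldl (fun ks x => let k := pvKey x; if k ∈ ks then ks else ks ++ [k]) []).map _
        = _
    rw [keysFold_eq]
    rfl
  rw [hA, hB, foldC (jbcFun jobs) contacts [] (fun _ => []) (fun _ _ => rfl)]
  exact mkD_congr (fun c _ => by simp) (fun c _ => by simp [jbcFun_eq])

-- ===== VERDICT (by name: the statement is the Claim_ definition above) =====
theorem group_contacts_by_company_py_spec : Claim_equal_group_contacts_by_company_py := by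
  intro contacts jobs _
  exact group_equal contacts jobs
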